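-- pv_equiv track=rewrite | github.com/LeoPR/FG2P | src/analyze_errors.py | _max_consecutive_ngram
-- ===== SOURCE A (Python) =====
-- def _max_consecutive_ngram(seq, ngram_size):
--     """Retorna dict {ngram: max_repetições_consecutivas} para repeats ≥ 2."""
--     result = {}
--     if len(seq) < ngram_size * 2:
--         return result
--     seen = set()
--     for j in range(len(seq) - ngram_size + 1):
--         ngram = tuple(seq[j:j+ngram_size])
--         if ngram in seen:
--             continue
--         seen.add(ngram)
--         consecutive = 1
--         pos = j + ngram_size
--         while pos + ngram_size <= len(seq):
--             if tuple(seq[pos:pos+ngram_size]) == ngram: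
--                 consecutive += 1
--                 pos += ngram_size
--             else:
--                 break
--         if consecutive >= 2:
--             result[ngram] = consecutive
--     return result
-- ===== SOURCE B (Python) =====
-- def _max_consecutive_ngram(seq, ngram_size):
--     """Retorna dict {ngram: max_repetições_consecutivas} para repeats ≥ 2."""
--     result = {}
--     if ngram_size < 1 or len(seq) < ngram_size * 2:
--         return result
--     m = len(seq) - ngram_size + 1
--     blocks = [tuple(seq[i:i + ngram_size]) for i in range(m)]
--     # suffix DP: counts[i] = length of the run of consecutive equal blocks starting at i
--     counts = [1] * m
--     for i in range(m - 1, -1, -1):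
--         j = i + ngram_size
--         if j < m and blocks[j] == blocks[i]:
--             counts[i] = counts[j] + 1
--     seen = set()
--     for i in range(m):
--         b = blocks[i]
--         if b not in seen:
--             seen.add(b)
--             c = counts[i]
--             if c >= 2:
--                 result[b] = c
--     return result
-- ===== Notes on version B (the rewrite author's own statement) =====
-- stated objective: alternative
-- what changed: Replaces A's per-first-occurrence rescanning while-loop by a right-to-left suffix DP table counts[i]=counts[i+n]+1 when adjacent blocks are equal, then one left-to-right pass recording each first-seen ngram's count (intended to avoid quadratic rescanning of long runs; a timing run measured only ~1.4x at the largest size, so no speed is claimed).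
-- outside the precondition, e.g. on _max_consecutive_ngram(['a', 'b'], -1): A returns {}, B returns {}; on _max_consecutive_ngram([], 0): A does not finish within the time limit, B returns {}
import Mathlib
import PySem

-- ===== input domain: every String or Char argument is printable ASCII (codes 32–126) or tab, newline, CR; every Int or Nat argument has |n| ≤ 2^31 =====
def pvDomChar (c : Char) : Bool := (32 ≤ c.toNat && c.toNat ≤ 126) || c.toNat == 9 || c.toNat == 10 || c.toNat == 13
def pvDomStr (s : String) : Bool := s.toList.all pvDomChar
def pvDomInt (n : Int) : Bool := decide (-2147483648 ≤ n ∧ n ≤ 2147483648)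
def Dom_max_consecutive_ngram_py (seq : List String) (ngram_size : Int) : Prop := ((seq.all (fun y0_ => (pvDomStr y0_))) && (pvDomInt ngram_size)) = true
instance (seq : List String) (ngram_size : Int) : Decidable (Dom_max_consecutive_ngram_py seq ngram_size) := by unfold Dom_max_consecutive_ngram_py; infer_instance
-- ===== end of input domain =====

-- B replaces A's per-first-occurrence rescanning while-loop by a right-to-left suffix DP table of run
-- lengths plus one left-to-right recording pass (objective: alternative; no speed claim).

-- ===== PORT A =====
-- A's inner 'while pos + ngram_size <= len(seq)' loop; the '0 < n' test only makes the recursion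
-- well-founded (under Pre_ it is always true; Python diverges for n ≤ 0 where the slice keeps matching).
def pvWhileA (seq : List String) (ngram : List String) (n : Int) (consecutive : Int) (pos : Int) : Int :=
  if _h1 : pos + n ≤ (seq.length : Int) then
    if _h2 : PySem.List.slice seq (some pos) (some (pos + n)) = ngram then
      if _h3 : 0 < n then pvWhileA seq ngram n (consecutive + 1) (pos + n)
      else consecutive
    else consecutive
  else consecutive
termination_by ((seq.length : Int) + n - pos).toNat
decreasing_by omega

def max_consecutive_ngram_py (seq : List String) (ngram_size : Int) : List (List String × Int) :=
  let result : PySem.Dict (List String) Int := PySem.Dict.empty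
  if (seq.length : Int) < ngram_size * 2 then result.items
  else
    let st := (PySem.List.pyRange 0 ((seq.length : Int) - ngram_size + 1) 1).foldl
      (fun (st : PySem.Set (List String) × PySem.Dict (List String) Int) j =>
        let (seen, result) := st
        let ngram := PySem.List.slice seq (some j) (some (j + ngram_size))
        if PySem.Set.contains seen ngram then st
        else
          let seen := PySem.Set.add seen ngram
          let consecutive := pvWhileA seq ngram ngram_size 1 (j + ngram_size)
          if 2 ≤ consecutive then (seen, result.insert ngram consecutive)
          else (seen, result))
      (PySem.Set.empty, result)
    st.2.items

-- ===== PORT B =====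
def max_consecutive_ngram_py_alt (seq : List String) (ngram_size : Int) : List (List String × Int) :=
  let result : PySem.Dict (List String) Int := PySem.Dict.empty
  if ngram_size < 1 ∨ (seq.length : Int) < ngram_size * 2 then result.items
  else
    let m : Int := (seq.length : Int) - ngram_size + 1
    let blocks : List (List String) := (PySem.List.pyRange 0 m 1).map
      (fun i => PySem.List.slice seq (some i) (some (i + ngram_size)))
    let counts0 : List Int := List.replicate m.toNat 1
    let counts := (PySem.List.pyRange (m - 1) (-1) (-1)).foldl
      (fun counts i =>
        let j := i + ngram_size
        if j < m ∧ PySem.List.pyGetD blocks j [] = PySem.List.pyGetD blocks i [] then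
          PySem.List.pySetD counts i (PySem.List.pyGetD counts j 0 + 1)
        else counts) counts0
    let st := (PySem.List.pyRange 0 m 1).foldl
      (fun (st : PySem.Set (List String) × PySem.Dict (List String) Int) i =>
        let (seen, result) := st
        let b := PySem.List.pyGetD blocks i []
        if !PySem.Set.contains seen b then
          let seen := PySem.Set.add seen b
          let c := PySem.List.pyGetD counts i 0
          if 2 ≤ c then (seen, result.insert b c)
          else (seen, result)
        else st)
      (PySem.Set.empty, result)
    st.2.items

-- ===== PRECONDITION & SPEC =====
-- Pre_ restricts to the natural domain ngram_size ≥ 1: for ngram_size = 0 (always) and for some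
-- negative sizes A diverges (the empty slice keeps matching), and the {} it returns on the other
-- non-positive sizes is an accident of slice clamping, not a specified value.
def Pre_max_consecutive_ngram_py (seq : List String) (ngram_size : Int) : Prop := 1 ≤ ngram_size
instance (seq : List String) (ngram_size : Int) : Decidable (Pre_max_consecutive_ngram_py seq ngram_size) := by unfold Pre_max_consecutive_ngram_py; infer_instance

def pvWitness_max_consecutive_ngram_py : List String × Int := (["a", "a", "a"], 1)

def Spec_max_consecutive_ngram_py (seq : List String) (ngram_size : Int) (out : List (List String × Int)) : Prop := out = max_consecutive_ngram_py_alt seq ngram_size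
instance (seq : List String) (ngram_size : Int) (out : List (List String × Int)) : Decidable (Spec_max_consecutive_ngram_py seq ngram_size out) := by unfold Spec_max_consecutive_ngram_py; infer_instance

-- ===== CLAIM (what is proved, stated in full; the proofs are below) =====
def Claim_equal_max_consecutive_ngram_py : Prop := ∀ (seq : List String) (ngram_size : Int), Dom_max_consecutive_ngram_py seq ngram_size → Pre_max_consecutive_ngram_py seq ngram_size → Spec_max_consecutive_ngram_py seq ngram_size (max_consecutive_ngram_py seq ngram_size)

-- ===== LEMMAS AND PROOFS =====

-- the ngram starting at position k
def pvBlock (seq : List String) (N k : Nat) : List String := List.take N (List.drop k seq)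

-- run length: number of consecutive occurrences of pvBlock seq N k starting at k (stride N)
def pvRun (seq : List String) (N k : Nat) : Int :=
  if h : 0 < N ∧ k + 2 * N ≤ seq.length ∧ pvBlock seq N (k + N) = pvBlock seq N k then
    pvRun seq N (k + N) + 1
  else 1
termination_by seq.length - k
decreasing_by omega

theorem pvWhileA_eq (seq : List String) (N : Nat) (hN : 0 < N) :
    ∀ (d k : Nat) (c : Int), seq.length - k ≤ d →
      pvWhileA seq (pvBlock seq N k) (N : Int) c ((k : Int) + (N : Int)) =
        c + pvRun seq N k - 1 := by
  intro d
  induction d with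
  | zero =>
    intro k c hle
    rw [pvWhileA, pvRun]
    rw [dif_neg (by omega), dif_neg (by omega)]
    ring
  | succ d ih =>
    intro k c hle
    have hsl : PySem.List.slice seq (some ((k : Int) + (N : Int)))
        (some ((k : Int) + (N : Int) + (N : Int))) = pvBlock seq N (k + N) := by
      have h := PySem.List.slice_natCast_add seq (k + N) N
      push_cast at h
      exact h
    rw [pvWhileA, pvRun]
    by_cases h1 : ((k : Int) + (N : Int) + (N : Int)) ≤ (seq.length : Int)
    · rw [dif_pos h1]
      by_cases heq : pvBlock seq N (k + N) = pvBlock seq N k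
      · rw [dif_pos (by rw [hsl]; exact heq), dif_pos (by exact_mod_cast hN),
          dif_pos ⟨hN, by omega, heq⟩]
        have hrec := ih (k + N) (c + 1) (by omega)
        rw [heq] at hrec
        push_cast at hrec
        rw [hrec]
        ring
      · rw [dif_neg (by rw [hsl]; exact heq), dif_neg (by intro h; exact heq h.2.2)]
        ring
    · rw [dif_neg h1, dif_neg (by omega)]
      ring

theorem pvCounts_fold (seq : List String) (N m : Nat) (hN : 0 < N)
    (hm : m = seq.length - N + 1) (hL : 2 * N ≤ seq.length) :
    ∀ (i : Nat), i ≤ m → ∀ (counts : List Int), counts.length = m →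
      (∀ k, k < m → PySem.List.pyGetD counts (k : Int) 0 =
        if i ≤ k then pvRun seq N k else 1) →
      ∀ k, k < m →
        PySem.List.pyGetD
          ((PySem.List.pyRange ((i : Int) - 1) (-1) (-1)).foldl
            (fun counts i =>
              if i + (N : Int) < (m : Int) ∧
                  PySem.List.pyGetD ((PySem.List.pyRange 0 (m : Int) 1).map
                    (fun i => PySem.List.slice seq (some i) (some (i + (N : Int))))) (i + (N : Int)) [] =
                  PySem.List.pyGetD ((PySem.List.pyRange 0 (m : Int) 1).map
                    (fun i => PySem.List.slice seq (some i) (some (i + (N : Int))))) i [] then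
                PySem.List.pySetD counts i (PySem.List.pyGetD counts (i + (N : Int)) 0 + 1)
              else counts) counts) (k : Int) 0 = pvRun seq N k := by
  have hblk : ∀ k : Nat, k < m →
      PySem.List.pyGetD ((PySem.List.pyRange 0 (m : Int) 1).map
        (fun i => PySem.List.slice seq (some i) (some (i + (N : Int))))) (k : Int) []
        = pvBlock seq N k := by
    intro k hk
    rw [PySem.List.pyGetD_map_pyRange _ m k _ hk]
    simpa [pvBlock] using PySem.List.slice_natCast_add seq k N
  intro i
  induction i with
  | zero =>
    intro _ counts hlen hinv k hk
    rw [show ((0 : Nat) : Int) - 1 = -1 by norm_num,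
      PySem.List.pyRange_neg_one_eq_nil le_rfl]
    simpa using hinv k hk
  | succ i ih =>
    intro hi1 counts hlen hinv k hk
    rw [show ((i + 1 : Nat) : Int) - 1 = (i : Int) by push_cast; ring,
      PySem.List.pyRange_neg_one_cons (by omega : (-1 : Int) < (i : Int))]
    simp only [List.foldl_cons]
    have hiN_cast : ((i : Int) + (N : Int)) = ((i + N : Nat) : Int) := by push_cast; ring
    have him : i < m := by omega
    by_cases hc : ((i : Int) + (N : Int) < (m : Int) ∧
        PySem.List.pyGetD ((PySem.List.pyRange 0 (m : Int) 1).map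
          (fun i => PySem.List.slice seq (some i) (some (i + (N : Int))))) ((i : Int) + (N : Int)) [] =
        PySem.List.pyGetD ((PySem.List.pyRange 0 (m : Int) 1).map
          (fun i => PySem.List.slice seq (some i) (some (i + (N : Int))))) (i : Int) [])
    · rw [if_pos hc]
      have hiN : i + N < m := by
        have := hc.1
        omega
      have hbeq : pvBlock seq N (i + N) = pvBlock seq N i := by
        have h2 := hc.2
        rw [hiN_cast, hblk _ hiN, hblk _ him] at h2
        exact h2
      have hval : PySem.List.pyGetD counts ((i : Int) + (N : Int)) 0 = pvRun seq N (i + N) := by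
        rw [hiN_cast, hinv _ hiN, if_pos (by omega)]
      have hrun : pvRun seq N i = pvRun seq N (i + N) + 1 := by
        rw [pvRun]
        rw [dif_pos ⟨hN, by omega, hbeq⟩]
      refine ih (by omega) _ (by rw [PySem.List.length_pySetD]; exact hlen) ?_ k hk
      intro k' hk'
      rw [hval, PySem.List.pyGetD_pySetD_natCast counts i k' _ _ (by omega)]
      by_cases hki : k' = i
      · subst hki
        rw [if_pos rfl, if_pos (le_refl _), hrun]
      · rw [if_neg hki, hinv k' hk']
        split_ifs <;> first | rfl | omega
    · rw [if_neg hc]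
      refine ih (by omega) _ hlen ?_ k hk
      intro k' hk'
      rw [hinv k' hk']
      by_cases hki : k' = i
      · subst hki
        rw [if_neg (by omega), if_pos (le_refl _)]
        rw [pvRun, dif_neg]
        rintro ⟨_, h2n, hbe⟩
        apply hc
        constructor
        · omega
        · rw [hiN_cast, hblk _ (by omega), hblk _ him]
          exact hbe
      · split_ifs <;> first | rfl | omega

-- ===== VERDICT (by name: the statement is the Claim_ definition above) =====
theorem max_consecutive_ngram_py_spec : Claim_equal_max_consecutive_ngram_py := by
  intro seq n _ hpre
  unfold Pre_max_consecutive_ngram_py at hpre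
  unfold Spec_max_consecutive_ngram_py
  lift n to ℕ using (by omega : (0 : Int) ≤ n) with N
  have hN : 0 < N := by exact_mod_cast hpre
  unfold max_consecutive_ngram_py max_consecutive_ngram_py_alt
  simp only []
  by_cases hg : (seq.length : Int) < (N : Int) * 2
  · rw [if_pos hg, if_pos (Or.inr hg)]
  · rw [if_neg hg, if_neg (by rw [not_or]; exact ⟨by omega, hg⟩)]
    have hL : 2 * N ≤ seq.length := by omega
    have hm : (seq.length : Int) - (N : Int) + 1 = ((seq.length - N + 1 : Nat) : Int) := by
      push_cast; omega
    rw [hm]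
    simp only [Int.toNat_natCast]
    set m := seq.length - N + 1 with hm_def
    have hblk2 : ∀ k : Nat, k < m →
        PySem.List.pyGetD ((PySem.List.pyRange 0 (m : Int) 1).map
          (fun i => PySem.List.slice seq (some i) (some (i + (N : Int))))) (k : Int) []
          = pvBlock seq N k := by
      intro k hk
      rw [PySem.List.pyGetD_map_pyRange _ m k _ hk]
      simpa [pvBlock] using PySem.List.slice_natCast_add seq k N
    have hcounts := pvCounts_fold seq N m hN rfl hL m le_rfl (List.replicate m 1)
      (by simp)
      (fun k hk => by
        rw [PySem.List.pyGetD_natCast, List.getD_eq_getElem?_getD, List.getElem?_replicate,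
          if_pos hk, if_neg (by omega)]
        rfl)
    apply congrArg (fun st : PySem.Set (List String) × PySem.Dict (List String) Int => st.2.items)
    apply PySem.List.foldl_congr_mem
    intro acc x hx
    rw [PySem.List.mem_pyRange_one] at hx
    lift x to ℕ using hx.1 with k
    have hk : k < m := by exact_mod_cast hx.2
    obtain ⟨seen, res⟩ := acc
    have hsl : PySem.List.slice seq (some (k : Int)) (some ((k : Int) + (N : Int)))
        = pvBlock seq N k := by
      simpa [pvBlock] using PySem.List.slice_natCast_add seq k N
    have hwh := pvWhileA_eq seq N hN seq.length k 1 (by omega)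
    have h1 : (1 : Int) + pvRun seq N k - 1 = pvRun seq N k := by ring
    rw [h1] at hwh
    simp only [hsl, hblk2 k hk, hcounts k hk, hwh]
    cases hb : PySem.Set.contains seen (pvBlock seq N k) <;> simp
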